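-- pv_equiv track=rewrite | github.com/rraquel/KnowtheeJune2025 | backend/ingestion/embedding/pipeline.py | _generate_idi_summary
-- ===== SOURCE A (Python) =====
-- def _generate_idi_summary(content: str) -> str:
--     """Generate a summary for an IDI assessment.
--
--     Args:
--         content: Raw content of the IDI assessment
--
--     Returns:
--         Summary text
--     """
--     # Extract key sections and scores
--     sections = []
--     current_section = []
--
--     for line in content.split('\n'):
--         if line.strip().startswith('Section') or line.strip().startswith('Dimension'):
--             if current_section:
--                 sections.append('\n'.join(current_section))
--             current_section = [line]
--         else:
--             current_section.append(line)
--
--     if current_section: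
--         sections.append('\n'.join(current_section))
--
--     # Format summary
--     summary = "IDI Assessment Summary\n"
--     summary += "=" * 50 + "\n\n"
--
--     for section in sections:
--         summary += section + "\n\n"
--
--     return summary
-- ===== SOURCE B (Python) =====
-- # The grouping-and-regrouping in the original boils down to: print the content
-- # with a blank line inserted before every 'Section'/'Dimension' header line.
-- # Do that directly in one pass over the lines.
--
-- def _generate_idi_summary(content: str) -> str:
--     lines = content.split('\n')
--     parts = [lines[0]]
--     for line in lines[1:]:
--         sep = '\n\n' if line.strip().startswith(('Section', 'Dimension')) else '\n'
--         parts.append(sep + line)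
--     return 'IDI Assessment Summary\n' + '=' * 50 + '\n\n' + ''.join(parts) + '\n\n'
-- ===== Notes on version B (the rewrite author's own statement) =====
-- stated objective: simpler
-- what changed: Replaces the two-phase grouping (accumulate lines into a current_section list, collect sections, then concatenate them) by a single join pass over the lines that inserts a blank line before each header line.
import Mathlib
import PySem

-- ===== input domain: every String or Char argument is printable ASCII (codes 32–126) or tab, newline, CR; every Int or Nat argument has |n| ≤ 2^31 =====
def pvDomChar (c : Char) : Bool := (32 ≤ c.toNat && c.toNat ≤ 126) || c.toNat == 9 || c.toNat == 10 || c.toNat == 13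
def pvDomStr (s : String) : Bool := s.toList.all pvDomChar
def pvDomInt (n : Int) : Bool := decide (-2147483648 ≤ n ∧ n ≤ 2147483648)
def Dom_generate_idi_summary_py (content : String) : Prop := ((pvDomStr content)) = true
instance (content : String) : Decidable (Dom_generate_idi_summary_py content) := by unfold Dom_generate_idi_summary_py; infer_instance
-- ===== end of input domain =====

-- B replaces A's two-phase section grouping by one join pass over the lines that
-- inserts a blank line before each header line (objective: simpler).

-- ===== PORT A =====
-- the header test: line.strip().startswith('Section') or line.strip().startswith('Dimension')
def pvHdr (line : List Char) : Bool :=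
  PySem.Chars.startswith (PySem.Chars.strip line) "Section".toList ||
  PySem.Chars.startswith (PySem.Chars.strip line) "Dimension".toList

-- one iteration of A's for-loop over lines; state = (sections, current_section)
def pvStepA (st : List (List Char) × List (List Char)) (line : List Char) :
    List (List Char) × List (List Char) :=
  if pvHdr line then
    (if st.2 ≠ [] then st.1 ++ [PySem.Chars.join ['\n'] st.2] else st.1, [line])
  else (st.1, st.2 ++ [line])

-- the trailing 'if current_section: sections.append(...)'
def pvFinishA (st : List (List Char) × List (List Char)) : List (List Char) :=
  if st.2 ≠ [] then st.1 ++ [PySem.Chars.join ['\n'] st.2] else st.1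

def generate_idi_summary_py (content : String) : String :=
  let sections := pvFinishA ((PySem.Chars.splitOn content.toList ['\n']).foldl pvStepA ([], []))
  let summary := "IDI Assessment Summary\n".toList ++ List.replicate 50 '=' ++ "\n\n".toList
  String.mk (sections.foldl (fun s sec => s ++ sec ++ "\n\n".toList) summary)

-- ===== PORT B =====
-- Source B's loop body: sep + line, with sep chosen by the same strip/startswith test
def pvPartB (line : List Char) : List Char :=
  (if pvHdr line then "\n\n".toList else "\n".toList) ++ line

def generate_idi_summary_py_alt (content : String) : String :=
  let lines := PySem.Chars.splitOn content.toList ['\n']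
  let body := (lines.drop 1).foldl (fun parts line => parts ++ pvPartB line) (lines.headD [])
  String.mk ("IDI Assessment Summary\n".toList ++ List.replicate 50 '=' ++ "\n\n".toList
    ++ body ++ "\n\n".toList)

-- ===== PRECONDITION & SPEC =====
def Spec_generate_idi_summary_py (content : String) (out : String) : Prop := out = generate_idi_summary_py_alt content
instance (content : String) (out : String) : Decidable (Spec_generate_idi_summary_py content out) := by unfold Spec_generate_idi_summary_py; infer_instance

-- ===== CLAIM =====
def Claim_equal_generate_idi_summary_py : Prop := ∀ (content : String), Dom_generate_idi_summary_py content → Spec_generate_idi_summary_py content (generate_idi_summary_py content)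

-- ===== LEMMAS AND PROOFS =====

-- proof-only reformulation of Python's split('\n') with an explicit accumulator
def pvSplitAux : List Char → List Char → List (List Char)
  | [], cur => [cur.reverse]
  | c :: t, cur => if c = '\n' then cur.reverse :: pvSplitAux t [] else pvSplitAux t (c :: cur)

-- PySem's fueled splitter equals pvSplitAux when the fuel suffices
lemma pv_go_eq : ∀ (fuel : Nat) (l cur : List Char) (acc : List (List Char)), l.length < fuel →
    PySem.Chars.splitOn.go ['\n'] fuel l cur acc = acc.reverse ++ pvSplitAux l cur := by
  intro fuel
  induction fuel with
  | zero => intro l cur acc h; omega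
  | succ n ih =>
    intro l cur acc h
    cases l with
    | nil => simp [PySem.Chars.splitOn.go, pvSplitAux]
    | cons c t =>
      simp only [PySem.Chars.splitOn.go]
      by_cases hc : c = '\n'
      · subst hc
        simp [List.isPrefixOf, pvSplitAux, ih t [] (cur.reverse :: acc) (by simp at h ⊢; omega)]
      · have hpre : List.isPrefixOf ['\n'] (c :: t) = false := by
          simp [List.isPrefixOf]; exact fun hh => absurd hh.symm hc
        simp [hpre, pvSplitAux, hc, ih t (c :: cur) acc (by simp at h ⊢; omega)]

lemma pv_splitOn_eq (cs : List Char) : PySem.Chars.splitOn cs ['\n'] = pvSplitAux cs [] := by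
  simpa using pv_go_eq (cs.length + 1) cs [] [] (by omega)

-- the accumulator only prefixes the head line
lemma pvSplitAux_spec : ∀ t : List Char, ∃ h tl, ∀ cur, pvSplitAux t cur = (cur.reverse ++ h) :: tl := by
  intro t
  induction t with
  | nil => exact ⟨[], [], fun cur => by simp [pvSplitAux]⟩
  | cons c t ih =>
    obtain ⟨h, tl, ih⟩ := ih
    by_cases hc : c = '\n'
    · subst hc
      exact ⟨[], pvSplitAux t [], fun cur => by simp [pvSplitAux]⟩
    · exact ⟨c :: h, tl, fun cur => by simp [pvSplitAux, hc, ih (c :: cur)]⟩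

-- intercalate over a nonempty-tail cons
lemma pv_join_cons (a b : List Char) (l : List (List Char)) :
    PySem.Chars.join ['\n'] (a :: b :: l) = a ++ '\n' :: PySem.Chars.join ['\n'] (b :: l) := by
  simp [PySem.Chars.join, List.intercalate, List.intersperse]

lemma pv_join_singleton (a : List Char) : PySem.Chars.join ['\n'] [a] = a := by
  simp [PySem.Chars.join, List.intercalate]

-- join (cur ++ [l]) for nonempty cur
lemma pv_join_snoc : ∀ (cur : List (List Char)) (l : List Char), cur ≠ [] →
    PySem.Chars.join ['\n'] (cur ++ [l]) = PySem.Chars.join ['\n'] cur ++ '\n' :: l := by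
  intro cur
  induction cur with
  | nil => intro l h; exact absurd rfl h
  | cons a cur ih =>
    intro l _
    cases cur with
    | nil => simp [pv_join_cons]
    | cons b cur' =>
      have := ih l (by simp)
      simp only [List.cons_append] at this ⊢
      rw [pv_join_cons, pv_join_cons, this]
      simp [List.append_assoc]

-- the contribution of the lines after the first, shared by both sides' characterisations
def pvTail (ls : List (List Char)) : List Char := (ls.map pvPartB).flatten

-- A's summary loop as concat-map
lemma pv_foldl_app : ∀ (secs : List (List Char)) (init : List Char),
    secs.foldl (fun s sec => s ++ sec ++ "\n\n".toList) init
      = init ++ (secs.map (· ++ "\n\n".toList)).flatten := by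
  intro secs
  induction secs with
  | nil => simp
  | cons a secs ih => intro init; simp [List.append_assoc]

-- B's parts loop as concat-map
lemma pv_foldB : ∀ (ls : List (List Char)) (init : List Char),
    ls.foldl (fun parts line => parts ++ pvPartB line) init = init ++ pvTail ls := by
  intro ls
  induction ls with
  | nil => intro init; simp [pvTail]
  | cons l ls ih => intro init; simp [pvTail, ih, List.append_assoc]

-- invariant of A's grouping fold
lemma pv_foldA : ∀ (ls : List (List Char)) (sections cur : List (List Char)), cur ≠ [] →
    ((pvFinishA (ls.foldl pvStepA (sections, cur))).map (· ++ "\n\n".toList)).flatten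
      = (sections.map (· ++ "\n\n".toList)).flatten
        ++ PySem.Chars.join ['\n'] cur ++ pvTail ls ++ "\n\n".toList := by
  intro ls
  induction ls with
  | nil =>
    intro sections cur hcur
    simp [pvFinishA, hcur, pvTail, List.append_assoc]
  | cons l ls ih =>
    intro sections cur hcur
    by_cases hl : pvHdr l
    · have : pvStepA (sections, cur) l = (sections ++ [PySem.Chars.join ['\n'] cur], [l]) := by
        simp [pvStepA, hl, hcur]
      rw [List.foldl_cons, this, ih _ [l] (by simp)]
      simp [pvTail, pvPartB, hl, pv_join_singleton, List.append_assoc]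
    · have : pvStepA (sections, cur) l = (sections, cur ++ [l]) := by simp [pvStepA, hl]
      rw [List.foldl_cons, this, ih _ (cur ++ [l]) (by simp), pv_join_snoc cur l hcur]
      simp [pvTail, pvPartB, hl, List.append_assoc]

-- ===== VERDICT =====
theorem generate_idi_summary_py_spec : Claim_equal_generate_idi_summary_py := by
  intro content _
  unfold Spec_generate_idi_summary_py
  simp only [generate_idi_summary_py, generate_idi_summary_py_alt]
  obtain ⟨h, tl, hspec⟩ := pvSplitAux_spec content.toList
  have hsplit : PySem.Chars.splitOn content.toList ['\n'] = h :: tl := by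
    rw [pv_splitOn_eq]; simpa using hspec []
  have hfirst : pvStepA ([], []) h = ([], [h]) := by
    by_cases hh : pvHdr h <;> simp [pvStepA, hh]
  refine congrArg String.mk ?_
  rw [hsplit, List.foldl_cons, hfirst, pv_foldl_app,
      pv_foldA tl [] [h] (by simp)]
  simp [pv_foldB, pvTail, List.append_assoc]
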